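-- pv_equiv track=rewrite | github.com/cfe-lab/proviral | scripts/compare_runs/index_discovery.py | _count_shared_values
-- ===== SOURCE A (Python) =====
-- from typing import List, Dict, Optional, Any
--
-- def _count_shared_values(
--     csv_data1: List[List[str]], csv_data2: List[List[str]], column_name: str
-- ) -> int:
--     """
--     Count how many values are shared between the same column in two CSV files.
--
--     Args:
--         csv_data1: First CSV data
--         csv_data2: Second CSV data
--         column_name: Name of column to compare
--
--     Returns:
--         Number of shared non-empty values
--     """
--     if not csv_data1 or not csv_data2 or len(csv_data1) < 2 or len(csv_data2) < 2:
--         return 0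
--
--     headers1 = csv_data1[0]
--     headers2 = csv_data2[0]
--
--     if column_name not in headers1 or column_name not in headers2:
--         return 0
--
--     col_idx1 = headers1.index(column_name)
--     col_idx2 = headers2.index(column_name)
--
--     # Collect non-empty values from both files
--     values1 = set()
--     for row_idx in range(1, len(csv_data1)):
--         if col_idx1 < len(csv_data1[row_idx]):
--             value = csv_data1[row_idx][col_idx1].strip()
--             if value:
--                 values1.add(value)
--
--     values2 = set()
--     for row_idx in range(1, len(csv_data2)):
--         if col_idx2 < len(csv_data2[row_idx]):
--             value = csv_data2[row_idx][col_idx2].strip()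
--             if value:
--                 values2.add(value)
--
--     # Count shared values
--     return len(values1 & values2)
-- ===== SOURCE B (Python) =====
-- def _count_shared_values(csv_data1, csv_data2, column_name):
--     if not csv_data1 or not csv_data2 or len(csv_data1) < 2 or len(csv_data2) < 2:
--         return 0
--     headers1 = csv_data1[0]
--     headers2 = csv_data2[0]
--     if column_name not in headers1 or column_name not in headers2:
--         return 0
--     i1 = headers1.index(column_name)
--     i2 = headers2.index(column_name)
--
--     def sorted_col(rows, i):
--         # distinct non-empty stripped column values, sorted ascending
--         return sorted({v for row in rows[1:] if i < len(row)
--                        for v in [row[i].strip()] if v})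
--
--     xs = sorted_col(csv_data1, i1)
--     ys = sorted_col(csv_data2, i2)
--
--     # two-pointer merge over the two sorted distinct lists
--     count = 0
--     p = 0
--     q = 0
--     while p < len(xs) and q < len(ys):
--         if xs[p] == ys[q]:
--             count += 1
--             p += 1
--             q += 1
--         elif xs[p] < ys[q]:
--             p += 1
--         else:
--             q += 1
--     return count
-- ===== Notes on version B (the rewrite author's own statement) =====
-- stated objective: alternative
-- what changed: B sorts the distinct column values of each file and counts common values by a two-pointer merge of the two sorted lists, instead of building two hash sets and taking their intersection.
import Mathlib
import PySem

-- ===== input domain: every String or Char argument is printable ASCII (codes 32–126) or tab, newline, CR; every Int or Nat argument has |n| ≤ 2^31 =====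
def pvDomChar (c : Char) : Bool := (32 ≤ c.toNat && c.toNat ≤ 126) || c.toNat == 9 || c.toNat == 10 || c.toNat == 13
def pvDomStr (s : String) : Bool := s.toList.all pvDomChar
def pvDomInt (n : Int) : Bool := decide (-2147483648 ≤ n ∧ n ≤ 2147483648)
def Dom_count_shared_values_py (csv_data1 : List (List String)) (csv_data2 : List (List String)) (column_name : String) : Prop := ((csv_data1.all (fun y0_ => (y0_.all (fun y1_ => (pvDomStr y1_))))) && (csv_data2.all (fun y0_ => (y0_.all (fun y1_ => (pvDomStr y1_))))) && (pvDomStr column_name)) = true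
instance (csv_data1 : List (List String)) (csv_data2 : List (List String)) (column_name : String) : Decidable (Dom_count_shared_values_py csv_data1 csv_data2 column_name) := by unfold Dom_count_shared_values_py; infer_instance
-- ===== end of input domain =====

-- B sorts each file's distinct column values and counts shared values by a two-pointer merge instead of intersecting two sets; return values proved equal.


-- ===== PORT A =====
-- A's value-collection loop: over the data rows, bounds check, strip, skip empty, add to a set.
def pvCollectA (rows : List (List String)) (idx : Nat) : PySem.Set String :=
  rows.foldl (fun s row =>
    if idx < row.length then
      let value := PySem.Str.strip (row.getD idx "")
      if value ≠ "" then PySem.Set.add s value else s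
    else s) PySem.Set.empty

def count_shared_values_py (csv_data1 : List (List String)) (csv_data2 : List (List String)) (column_name : String) : Int :=
  if csv_data1.isEmpty || csv_data2.isEmpty || csv_data1.length < 2 || csv_data2.length < 2 then 0
  else
    let headers1 := csv_data1.headD []
    let headers2 := csv_data2.headD []
    if !(headers1.contains column_name) || !(headers2.contains column_name) then 0
    else
      let col_idx1 := (PySem.List.index? headers1 column_name).getD 0
      let col_idx2 := (PySem.List.index? headers2 column_name).getD 0
      let values1 := pvCollectA (csv_data1.drop 1) col_idx1
      let values2 := pvCollectA (csv_data2.drop 1) col_idx2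
      ((PySem.Set.inter values1 values2).length : Int)

-- ===== PORT B =====
-- B's sorted_col helper: sorted set-comprehension over rows[1:] (distinct non-empty stripped values, ascending).
def pvSortedCol (rows : List (List String)) (i : Nat) : List String :=
  PySem.List.sorted (PySem.Set.ofList ((rows.drop 1).filterMap (fun row =>
    if i < row.length then
      let v := PySem.Str.strip (row.getD i "")
      if v ≠ "" then some v else none
    else none))) (fun x => x) false

-- B's two-pointer merge loop over the two sorted distinct lists (recursion on the suffixes).
def pvMergeCount : List String → List String → Int
  | [], _ => 0
  | _ :: _, [] => 0
  | x :: xs, y :: ys =>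
    if x = y then 1 + pvMergeCount xs ys
    else if x < y then pvMergeCount xs (y :: ys)
    else pvMergeCount (x :: xs) ys
termination_by xs ys => xs.length + ys.length

def count_shared_values_py_alt (csv_data1 : List (List String)) (csv_data2 : List (List String)) (column_name : String) : Int :=
  if csv_data1.isEmpty || csv_data2.isEmpty || csv_data1.length < 2 || csv_data2.length < 2 then 0
  else
    let headers1 := csv_data1.headD []
    let headers2 := csv_data2.headD []
    if !(headers1.contains column_name) || !(headers2.contains column_name) then 0
    else
      let i1 := (PySem.List.index? headers1 column_name).getD 0
      let i2 := (PySem.List.index? headers2 column_name).getD 0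
      pvMergeCount (pvSortedCol csv_data1 i1) (pvSortedCol csv_data2 i2)

-- ===== PRECONDITION & SPEC =====
def Spec_count_shared_values_py (csv_data1 : List (List String)) (csv_data2 : List (List String)) (column_name : String) (out : Int) : Prop := out = count_shared_values_py_alt csv_data1 csv_data2 column_name
instance (csv_data1 : List (List String)) (csv_data2 : List (List String)) (column_name : String) (out : Int) : Decidable (Spec_count_shared_values_py csv_data1 csv_data2 column_name out) := by unfold Spec_count_shared_values_py; infer_instance

-- ===== CLAIM (what is proved, stated in full; the proofs are below) =====
def Claim_equal_count_shared_values_py : Prop := ∀ (csv_data1 : List (List String)) (csv_data2 : List (List String)) (column_name : String), Dom_count_shared_values_py csv_data1 csv_data2 column_name → Spec_count_shared_values_py csv_data1 csv_data2 column_name (count_shared_values_py csv_data1 csv_data2 column_name)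

-- ===== LEMMAS AND PROOFS =====

-- proof-only: the list of column values A's loop adds, in row order
def pvVals (rows : List (List String)) (idx : Nat) : List String :=
  rows.filterMap (fun row =>
    if idx < row.length then
      let v := PySem.Str.strip (row.getD idx "")
      if v ≠ "" then some v else none
    else none)

theorem pvCollect_eq_update (rows : List (List String)) (idx : Nat) (s : PySem.Set String) :
    (rows.foldl (fun s row =>
      if idx < row.length then
        let v := PySem.Str.strip (row.getD idx "")
        if v ≠ "" then PySem.Set.add s v else s
      else s) s) = PySem.Set.update s (pvVals rows idx) := by
  induction rows generalizing s with
  | nil => simp [pvVals, PySem.Set.update_nil]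
  | cons r rs ih =>
    simp only [List.foldl_cons, pvVals, List.filterMap_cons]
    by_cases hb : idx < r.length
    · by_cases hv : PySem.Str.strip (r.getD idx "") ≠ ""
      · simp only [if_pos hb, if_pos hv, PySem.Set.update_cons]
        exact ih _
      · simp only [if_pos hb, if_neg hv]
        exact ih _
    · simp only [if_neg hb]
      exact ih _

theorem pvCollectA_eq_ofList (rows : List (List String)) (idx : Nat) :
    pvCollectA rows idx = PySem.Set.ofList (pvVals rows idx) := by
  unfold pvCollectA
  rw [pvCollect_eq_update, PySem.Set.update_empty]

-- the merge count on two strictly increasing lists is the number of elements of the first present in the second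
theorem pvMergeCount_eq_filter (xs ys : List String)
    (hx : xs.Pairwise (· < ·)) (hy : ys.Pairwise (· < ·)) :
    pvMergeCount xs ys = ((xs.filter (fun x => decide (x ∈ ys))).length : Int) := by
  fun_induction pvMergeCount xs ys with
  | case1 ys => simp
  | case2 x xs => simp
  | case3 xs y ys ih =>
    obtain ⟨hxhead, hxtail⟩ := List.pairwise_cons.mp hx
    have hfc : xs.filter (fun a => decide (a ∈ y :: ys)) = xs.filter (fun a => decide (a ∈ ys)) := by
      apply List.filter_congr
      intro a ha
      have hya : y < a := hxhead a ha
      simp only [List.mem_cons, decide_eq_decide]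
      constructor
      · rintro (h | h)
        · exact absurd (h ▸ hya) (lt_irrefl a)
        · exact h
      · exact Or.inr
    rw [ih hxtail (List.pairwise_cons.mp hy).2,
        List.filter_cons_of_pos (by simp), hfc]
    simp only [List.length_cons]
    push_cast
    ring
  | case4 x xs y ys hne hlt ih =>
    obtain ⟨hyhead, hytail⟩ := List.pairwise_cons.mp hy
    have hxmem : x ∉ y :: ys := by
      intro h
      rcases List.mem_cons.mp h with h | h
      · exact hne h
      · exact absurd (lt_trans hlt (hyhead x h)) (lt_irrefl x)
    rw [ih (List.pairwise_cons.mp hx).2 hy,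
        List.filter_cons_of_neg (by simpa using hxmem)]
  | case5 x xs y ys hne hnlt ih =>
    obtain ⟨hxhead, hxtail⟩ := List.pairwise_cons.mp hx
    have hygt : y < x := by
      rcases lt_trichotomy x y with h | h | h
      · exact absurd h hnlt
      · exact absurd h hne
      · exact h
    have hfc : (x :: xs).filter (fun a => decide (a ∈ y :: ys)) = (x :: xs).filter (fun a => decide (a ∈ ys)) := by
      apply List.filter_congr
      intro a ha
      have hya : y < a := by
        rcases List.mem_cons.mp ha with h | h
        · exact h ▸ hygt
        · exact lt_trans hygt (hxhead a h)
      simp [List.mem_cons]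
      intro h; exact absurd (h ▸ hya) (lt_irrefl a)
    rw [hfc, ih hx (List.pairwise_cons.mp hy).2]

-- pvSortedCol, re-stated through pvVals (definitional)
theorem pvSortedCol_eq (rows : List (List String)) (i : Nat) :
    pvSortedCol rows i
      = PySem.List.sorted (PySem.Set.ofList (pvVals (rows.drop 1) i)) (fun x => x) false := rfl

-- the core counting fact: |set(v1) & set(v2)| = merge count of the two sorted distinct lists
theorem pv_main (v1 v2 : List String) :
    ((PySem.Set.inter (PySem.Set.ofList v1) (PySem.Set.ofList v2)).length : Int)
      = pvMergeCount (PySem.List.sorted (PySem.Set.ofList v1) (fun x => x) false)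
                     (PySem.List.sorted (PySem.Set.ofList v2) (fun x => x) false) := by
  set X := PySem.List.sorted (PySem.Set.ofList v1) (fun x => x) false with hX
  set Y := PySem.List.sorted (PySem.Set.ofList v2) (fun x => x) false with hY
  have hpermX : X.Perm (PySem.Set.ofList v1) := PySem.List.sorted_perm _ _ _
  have hpermY : Y.Perm (PySem.Set.ofList v2) := PySem.List.sorted_perm _ _ _
  rw [pvMergeCount_eq_filter X Y (hX ▸ PySem.List.sorted_ofList_pairwise_lt v1)
        (hY ▸ PySem.List.sorted_ofList_pairwise_lt v2)]
  congr 1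
  have hnodupX : X.Nodup := hpermX.nodup_iff.mpr (PySem.Set.nodup_ofList v1)
  have hperm : (PySem.Set.inter (PySem.Set.ofList v1) (PySem.Set.ofList v2)).Perm
      (X.filter (fun x => decide (x ∈ Y))) := by
    rw [List.perm_ext_iff_of_nodup
      (PySem.Set.nodup_inter _ _ (PySem.Set.nodup_ofList v1)) (hnodupX.filter _)]
    intro a
    rw [PySem.Set.mem_inter, List.mem_filter]
    simp only [decide_eq_true_eq, hpermX.mem_iff, hpermY.mem_iff]
  exact hperm.length_eq

-- ===== VERDICT (by name: the statement is the Claim_ definition above) =====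
theorem count_shared_values_py_spec : Claim_equal_count_shared_values_py := by
  intro c1 c2 name _
  unfold Spec_count_shared_values_py
  simp only [count_shared_values_py, count_shared_values_py_alt]
  split_ifs with h1 h2
  · rfl
  · rfl
  · rw [pvCollectA_eq_ofList, pvCollectA_eq_ofList, pvSortedCol_eq, pvSortedCol_eq]
    exact pv_main _ _
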